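-- pv_equiv track=rewrite | github.com/Mbkramer/POKER_GAME | POKER/bots/cfr_bots/cfr/nlh_gamestate.py | _board_bucket
-- ===== SOURCE A (Python) =====
-- RANK_MAP = {
--     'A':14,'K':13,'Q':12,'J':11,'T':10,'10':10,  # support both 'T' and '10'
--     '9':9,'8':8,'7':7,'6':6,'5':5,'4':4,'3':3,'2':2,
-- }
--
-- def _card_val(card) -> tuple:
--     """(int_rank, suit_str) -- works for Card objects and tuples."""
--     if hasattr(card, 'value'):
--         return (RANK_MAP.get(card.value, 0), card.suit)
--     return (RANK_MAP.get(card[0], 0), card[1])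
--
-- def _board_bucket(community) -> int:
--     if not community: return 7
--     from collections import Counter
--     vals  = [_card_val(c)[0] for c in community]
--     suits = [_card_val(c)[1] for c in community]
--     vc, sc = Counter(vals), Counter(suits)
--
--     if max(vc.values()) >= 2: return 0   # paired
--     if max(sc.values()) >= 3: return 1   # monotone
--     if max(sc.values()) == 2: return 2   # two-tone
--     uvals = sorted(set(vals))
--     for i in range(len(uvals)):
--         if len([v for v in uvals if uvals[i] <= v <= uvals[i]+4]) >= 3:
--             return 3                      # connected
--     high = max(vals)
--     if high >= 12: return 4
--     if high >= 9:  return 5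
--     return 6
-- ===== SOURCE B (Python) =====
-- RANK_MAP = {
--     'A':14,'K':13,'Q':12,'J':11,'T':10,'10':10,
--     '9':9,'8':8,'7':7,'6':6,'5':5,'4':4,'3':3,'2':2,
-- }
--
-- def _board_bucket(community) -> int:
--     if not community:
--         return 7
--     # one fused pass: bitmask of ranks, pair flag, suit counts, flush-max, high card
--     mask = 0
--     paired = False
--     suit_counts = {}
--     flushy = 0
--     high = 0
--     for c in community:
--         r = RANK_MAP.get(c[0], 0)
--         bit = 1 << r
--         if mask & bit:
--             paired = True
--         mask |= bit
--         n = suit_counts.get(c[1], 0) + 1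
--         suit_counts[c[1]] = n
--         if n > flushy:
--             flushy = n
--         if r > high:
--             high = r
--     if paired:
--         return 0
--     if flushy >= 3:
--         return 1
--     if flushy == 2:
--         return 2
--     # connected: some 5-wide rank window holds >= 3 distinct ranks
--     for w in range(11):
--         if sum((mask >> (w + j)) & 1 for j in range(5)) >= 3:
--             return 3
--     if high >= 12:
--         return 4
--     if high >= 9:
--         return 5
--     return 6
-- ===== Notes on version B (the rewrite author's own statement) =====
-- stated objective: alternative
-- what changed: B replaces A's staged passes (two map passes, two Counters, sorted(set(...)) plus a per-start windowed re-scan) by one fused loop that maintains a rank bitmask, a pair flag, suit tallies with a running flush-max and a running high card, and decides connectedness by popcounting the eleven fixed 5-wide windows of the bitmask instead of sorting.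
import Mathlib
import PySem

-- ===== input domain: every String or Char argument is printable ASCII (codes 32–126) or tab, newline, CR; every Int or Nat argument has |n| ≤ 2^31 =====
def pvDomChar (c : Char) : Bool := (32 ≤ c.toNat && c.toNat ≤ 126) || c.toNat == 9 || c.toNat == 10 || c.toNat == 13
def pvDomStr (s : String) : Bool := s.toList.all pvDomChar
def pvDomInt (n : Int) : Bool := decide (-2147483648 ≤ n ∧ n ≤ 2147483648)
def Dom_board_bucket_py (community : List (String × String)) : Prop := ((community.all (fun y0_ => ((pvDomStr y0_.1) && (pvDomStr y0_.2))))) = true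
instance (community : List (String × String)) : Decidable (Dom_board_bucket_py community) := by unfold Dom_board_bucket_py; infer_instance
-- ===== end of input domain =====

-- B fuses everything into one pass (rank bitmask + pair flag + suit tallies with running flush-max
-- + running high card) and tests connectedness by popcounting fixed 5-wide bitmask windows, instead
-- of A's staged passes with Counters and sorted(set(...)) (objective: alternative).

-- ===== PORT A =====
def rankMap : PySem.Dict String Int := PySem.Dict.ofList
  [("A",14),("K",13),("Q",12),("J",11),("T",10),("10",10),
   ("9",9),("8",8),("7",7),("6",6),("5",5),("4",4),("3",3),("2",2)]

def cardVal (card : String × String) : Int × String := (rankMap.getD card.1 0, card.2)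

def board_bucket_py (community : List (String × String)) : Int :=
  if community = [] then 7 else
  let vals := community.map (fun c => (cardVal c).1)
  let suits := community.map (fun c => (cardVal c).2)
  let vc := PySem.Dict.counter vals
  let sc := PySem.Dict.counter suits
  if 2 ≤ (PySem.List.max? vc.values (fun v => v)).getD 0 then 0
  else if 3 ≤ (PySem.List.max? sc.values (fun v => v)).getD 0 then 1
  else if (PySem.List.max? sc.values (fun v => v)).getD 0 = 2 then 2
  else
    let uvals := PySem.List.sorted (PySem.Set.ofList vals) (fun v => v) false
    if (PySem.List.pyRange 0 (uvals.length : Int) 1).any (fun i =>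
         decide (3 ≤ (uvals.filter (fun v =>
           decide (PySem.List.pyGetD uvals i 0 ≤ v ∧ v ≤ PySem.List.pyGetD uvals i 0 + 4))).length))
    then 3
    else
      let high := (PySem.List.max? vals (fun v => v)).getD 0
      if 12 ≤ high then 4 else if 9 ≤ high then 5 else 6

-- ===== PORT B =====
-- one fused loop over the cards; state = (rank bitmask, pair flag, suit tallies, flush-max, high card)
def bStep (st : Nat × Bool × PySem.Dict String Int × Int × Int) (c : String × String) :
    Nat × Bool × PySem.Dict String Int × Int × Int :=
  let r := rankMap.getD c.1 0
  let bit : Nat := 1 <<< r.toNat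
  let paired := if st.1 &&& bit ≠ 0 then true else st.2.1
  let n := st.2.2.1.getD c.2 0 + 1
  let flushy := if st.2.2.2.1 < n then n else st.2.2.2.1
  let high := if st.2.2.2.2 < r then r else st.2.2.2.2
  (st.1 ||| bit, paired, st.2.2.1.insert c.2 n, flushy, high)

def board_bucket_py_alt (community : List (String × String)) : Int :=
  if community = [] then 7 else
  let st := community.foldl bStep (0, false, PySem.Dict.empty, 0, 0)
  if st.2.1 then 0
  else if 3 ≤ st.2.2.2.1 then 1
  else if st.2.2.2.1 = 2 then 2
  else if (List.range 11).any (fun w =>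
      3 ≤ (List.range 5).foldl (fun acc j => acc + ((st.1 >>> (w + j)) &&& 1)) 0) then 3
  else if 12 ≤ st.2.2.2.2 then 4
  else if 9 ≤ st.2.2.2.2 then 5
  else 6

-- ===== PRECONDITION & SPEC =====
def Spec_board_bucket_py (community : List (String × String)) (out : Int) : Prop := out = board_bucket_py_alt community
instance (community : List (String × String)) (out : Int) : Decidable (Spec_board_bucket_py community out) := by unfold Spec_board_bucket_py; infer_instance

-- ===== CLAIM (what is proved, stated in full; the proofs are below) =====
def Claim_equal_board_bucket_py : Prop := ∀ (community : List (String × String)), Dom_board_bucket_py community → Spec_board_bucket_py community (board_bucket_py community)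

-- ===== LEMMAS AND PROOFS =====

-- decomposition of B's fused loop into its independent components
def rankStep (st : Nat × Bool) (r : Int) : Nat × Bool :=
  (st.1 ||| (1 <<< r.toNat), if st.1 &&& (1 <<< r.toNat) ≠ 0 then true else st.2)

def suitStep (st : PySem.Dict String Int × Int) (s : String) : PySem.Dict String Int × Int :=
  let n := st.1.getD s 0 + 1
  (st.1.insert s n, if st.2 < n then n else st.2)

def highStep (h r : Int) : Int := if h < r then r else h

theorem bFold_eq (l : List (String × String)) :
    ∀ (m : Nat) (p : Bool) (d : PySem.Dict String Int) (f h : Int),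
    l.foldl bStep (m, p, d, f, h) =
      (((l.map (fun c => rankMap.getD c.1 0)).foldl rankStep (m, p)).1,
       ((l.map (fun c => rankMap.getD c.1 0)).foldl rankStep (m, p)).2,
       ((l.map (fun c => c.2)).foldl suitStep (d, f)).1,
       ((l.map (fun c => c.2)).foldl suitStep (d, f)).2,
       (l.map (fun c => rankMap.getD c.1 0)).foldl highStep h) := by
  induction l with
  | nil => intro m p d f h; rfl
  | cons c t ih =>
    intro m p d f h
    simp only [List.foldl_cons, List.map_cons, bStep, rankStep, suitStep, highStep]
    exact ih _ _ _ _ _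

theorem getD_self_or_mem_values {κ ν : Type} [BEq κ] [LawfulBEq κ] (d : PySem.Dict κ ν) (k : κ) (v : ν) :
    d.getD k v = v ∨ d.getD k v ∈ d.values := by
  rw [PySem.Dict.getD_eq_get?_getD]
  cases h : d.get? k with
  | none => left; rfl
  | some w =>
    right
    have hm := PySem.Dict.mem_items_of_get?_eq_some (d := d) h
    exact List.mem_map.mpr ⟨(k, w), hm, rfl⟩

theorem rank_bounds (s : String) : 0 ≤ rankMap.getD s 0 ∧ rankMap.getD s 0 ≤ 14 := by
  rcases getD_self_or_mem_values rankMap s 0 with h | h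
  · rw [h]; norm_num
  · have hv : rankMap.values = [14,13,12,11,10,10,9,8,7,6,5,4,3,2] := by rfl
    rw [hv] at h
    simp only [List.mem_cons, List.not_mem_nil, or_false] at h
    rcases h with h|h|h|h|h|h|h|h|h|h|h|h|h|h <;> rw [h] <;> norm_num

theorem and_shiftLeft_ne_zero (m k : Nat) : m &&& (1 <<< k) ≠ 0 ↔ m.testBit k := by
  rw [Nat.one_shiftLeft, Nat.and_two_pow]
  cases h : m.testBit k <;> simp

theorem or_shiftLeft_testBit (m k n : Nat) : (m ||| (1 <<< k)).testBit n ↔ (m.testBit n ∨ n = k) := by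
  rw [Nat.one_shiftLeft]
  simp [Nat.testBit_or, Nat.testBit_two_pow]
  tauto

theorem rankFold_mask (vs : List Int) : ∀ (m : Nat) (p : Bool) (n : Nat),
    ((vs.foldl rankStep (m, p)).1).testBit n ↔ (m.testBit n ∨ ∃ r ∈ vs, r.toNat = n) := by
  induction vs with
  | nil => intro m p n; simp
  | cons r t ih =>
    intro m p n
    rw [List.foldl_cons]
    show ((t.foldl rankStep (rankStep (m, p) r)).1).testBit n ↔ _
    rw [show rankStep (m, p) r = ((m ||| (1 <<< r.toNat)), if m &&& (1 <<< r.toNat) ≠ 0 then true else p) from rfl]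
    rw [ih]
    rw [or_shiftLeft_testBit]
    simp only [List.mem_cons]
    constructor
    · rintro ((h | h) | ⟨x, hx, hxn⟩)
      · exact Or.inl h
      · exact Or.inr ⟨r, Or.inl rfl, h.symm⟩
      · exact Or.inr ⟨x, Or.inr hx, hxn⟩
    · rintro (h | ⟨x, (rfl | hx), hxn⟩)
      · exact Or.inl (Or.inl h)
      · exact Or.inl (Or.inr hxn.symm)
      · exact Or.inr ⟨x, hx, hxn⟩

theorem rankFold_paired (vs : List Int) : ∀ (m : Nat) (p : Bool), (∀ r ∈ vs, 0 ≤ r) →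
    (((vs.foldl rankStep (m, p)).2 = true) ↔
      (p = true ∨ (∃ r ∈ vs, m.testBit r.toNat) ∨ ¬ vs.Nodup)) := by
  induction vs with
  | nil => intro m p _; simp
  | cons r t ih =>
    intro m p hnn
    have hr0 : 0 ≤ r := hnn r List.mem_cons_self
    have hnt : ∀ x ∈ t, 0 ≤ x := fun x hx => hnn x (List.mem_cons_of_mem r hx)
    rw [List.foldl_cons]
    rw [show rankStep (m, p) r = ((m ||| (1 <<< r.toNat)), if m &&& (1 <<< r.toNat) ≠ 0 then true else p) from rfl]
    rw [ih _ _ hnt]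
    have h1 : ((if m &&& (1 <<< r.toNat) ≠ 0 then true else p) = true) ↔ (m.testBit r.toNat ∨ p = true) := by
      split_ifs with h
      · simp [(and_shiftLeft_ne_zero m r.toNat).mp h]
      · rw [and_shiftLeft_ne_zero] at h
        simp [h]
    have h2 : (∃ x ∈ t, (m ||| (1 <<< r.toNat)).testBit x.toNat) ↔ ((∃ x ∈ t, m.testBit x.toNat) ∨ r ∈ t) := by
      constructor
      · rintro ⟨x, hx, hb⟩
        rw [or_shiftLeft_testBit] at hb
        rcases hb with hb | heq
        · exact Or.inl ⟨x, hx, hb⟩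
        · have hx0 := hnt x hx
          have : x = r := by omega
          subst this
          exact Or.inr hx
      · rintro (⟨x, hx, hb⟩ | hr)
        · exact ⟨x, hx, (or_shiftLeft_testBit m r.toNat x.toNat).mpr (Or.inl hb)⟩
        · exact ⟨r, hr, (or_shiftLeft_testBit m r.toNat r.toNat).mpr (Or.inr rfl)⟩
    have h3 : (∃ x ∈ r :: t, m.testBit x.toNat) ↔ (m.testBit r.toNat ∨ ∃ x ∈ t, m.testBit x.toNat) := by
      simp
    have h4 : (¬ (r :: t).Nodup) ↔ (r ∈ t ∨ ¬ t.Nodup) := by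
      simp [List.nodup_cons]
      tauto
    rw [h1, h2, h3, h4]
    constructor
    · rintro ((h | h) | (h | h) | h)
      · exact Or.inr (Or.inl (Or.inl h))
      · exact Or.inl h
      · exact Or.inr (Or.inl (Or.inr h))
      · exact Or.inr (Or.inr (Or.inl h))
      · exact Or.inr (Or.inr (Or.inr h))
    · rintro (h | (h | h) | (h | h))
      · exact Or.inl (Or.inr h)
      · exact Or.inl (Or.inl h)
      · exact Or.inr (Or.inl (Or.inl h))
      · exact Or.inr (Or.inl (Or.inr h))
      · exact Or.inr (Or.inr h)

theorem suitFold_props (xs : List String) :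
    ∀ (d : PySem.Dict String Int) (f : Int) (pre : List String),
    (∀ s, d.getD s 0 = (pre.count s : Int)) →
    (f ≤ (xs.foldl suitStep (d, f)).2
     ∧ (∀ s ∈ xs, (((pre ++ xs).count s : Nat) : Int) ≤ (xs.foldl suitStep (d, f)).2)
     ∧ ((xs.foldl suitStep (d, f)).2 = f ∨
        ∃ s ∈ xs, (xs.foldl suitStep (d, f)).2 ≤ (((pre ++ xs).count s : Nat) : Int))) := by
  induction xs with
  | nil => intro d f pre _; simp
  | cons x t ih =>
    intro d f pre hd
    have hstep : suitStep (d, f) x = (d.insert x (d.getD x 0 + 1), if f < d.getD x 0 + 1 then d.getD x 0 + 1 else f) := rfl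
    rw [List.foldl_cons, hstep, hd x]
    set n : Int := (pre.count x : Nat) + 1 with hn
    set f' : Int := if f < n then n else f with hf'
    have hd' : ∀ s, (d.insert x n).getD s 0 = ((pre ++ [x]).count s : Int) := by
      intro s
      rw [PySem.Dict.getD_insert, List.count_append]
      by_cases hsx : s = x
      · subst hsx; simp [hn]
      · have hxs : ¬ x = s := fun h => hsx h.symm
        simp [hsx, hd s, hxs]
    obtain ⟨ih1, ih2, ih3⟩ := ih (d.insert x n) f' (pre ++ [x]) hd'
    have hassoc : (pre ++ [x]) ++ t = pre ++ x :: t := by simp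
    rw [hassoc] at ih2 ih3
    have hff' : f ≤ f' := by rw [hf']; split <;> omega
    have hnf' : n ≤ f' := by rw [hf']; split <;> omega
    refine ⟨le_trans hff' ih1, ?_, ?_⟩
    · intro s hs
      rcases List.mem_cons.mp hs with rfl | hst
      · by_cases hxt : s ∈ t
        · exact ih2 s hxt
        · have hc : ((pre ++ s :: t).count s : Int) = n := by
            rw [hn, List.count_append, List.count_cons_self, List.count_eq_zero_of_not_mem hxt]
            push_cast
            ring
          rw [hc]
          exact le_trans hnf' ih1
      · exact ih2 s hst
    · rcases ih3 with h | ⟨s, hs, hle⟩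
      · rw [h, hf']
        split_ifs with hlt
        · right
          refine ⟨x, List.mem_cons_self, ?_⟩
          have : ((pre ++ x :: t).count x : Int) ≥ n := by
            push_cast [List.count_append, List.count_cons_self, hn]
            omega
          omega
        · left; rfl
      · exact Or.inr ⟨s, List.mem_cons_of_mem x hs, hle⟩

-- window count over a list: distinct elements within [lo, lo+4]
def wcnt (u : List Int) (lo : Int) : Nat :=
  (u.filter (fun v => decide (lo ≤ v ∧ v ≤ lo + 4))).length

theorem bit_eq_if (mask : Nat) (vals : List Int)
    (hmask : ∀ n : Nat, mask.testBit n ↔ ((n : Int) ∈ vals)) (k : Nat) :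
    (mask >>> k) &&& 1 = (if ((k : Nat) : Int) ∈ vals then 1 else 0) := by
  have h1 : (mask >>> k) &&& 1 = mask / 2 ^ k % 2 := by
    rw [Nat.and_one_is_mod, Nat.shiftRight_eq_div_pow]
  have h2 : mask.testBit k = decide (mask / 2 ^ k % 2 = 1) := Nat.testBit_eq_decide_div_mod_eq
  by_cases hm : ((k : Nat) : Int) ∈ vals
  · have : mask.testBit k = true := by rw [hmask]; exact hm
    rw [this] at h2
    have h3 := of_decide_eq_true h2.symm
    rw [h1, if_pos hm, h3]
  · have : mask.testBit k = false := by
      cases hb : mask.testBit k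
      · rfl
      · exact absurd ((hmask k).mp hb) hm
    rw [this] at h2
    have h3 : ¬ (mask / 2 ^ k % 2 = 1) := by
      intro h; rw [h] at h2; exact absurd h2.symm (by simp)
    have h4 : mask / 2 ^ k % 2 < 2 := Nat.mod_lt _ (by norm_num)
    rw [h1, if_neg hm]
    omega

theorem wcnt_eq_bits (u : List Int) (vals : List Int) (mask : Nat)
    (hund : u.Nodup) (hmemu : ∀ x, x ∈ u ↔ x ∈ vals)
    (hmask : ∀ n : Nat, mask.testBit n ↔ ((n : Int) ∈ vals)) (w : Nat) :
    (List.range 5).foldl (fun acc j => acc + ((mask >>> (w + j)) &&& 1)) 0 = wcnt u (w : Int) := by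
  have hW : ∀ x : Int, (x ∈ [((w:Nat):Int), (w:Int)+1, (w:Int)+2, (w:Int)+3, (w:Int)+4]) ↔ ((w:Int) ≤ x ∧ x ≤ (w:Int) + 4) := by
    intro x
    simp only [List.mem_cons, List.not_mem_nil, or_false]
    omega
  have hWnd : ([((w:Nat):Int), (w:Int)+1, (w:Int)+2, (w:Int)+3, (w:Int)+4]).Nodup := by
    simp only [List.nodup_cons, List.mem_cons, List.not_mem_nil, List.nodup_nil,
      or_false, not_or, not_false_iff, and_true]
    omega
  have hperm : (u.filter (fun v => decide ((w:Int) ≤ v ∧ v ≤ (w:Int) + 4))).Perm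
      (([((w:Nat):Int), (w:Int)+1, (w:Int)+2, (w:Int)+3, (w:Int)+4]).filter (fun x => decide (x ∈ vals))) := by
    rw [List.perm_ext_iff_of_nodup (List.Nodup.filter _ hund) (List.Nodup.filter _ hWnd)]
    intro x
    simp only [List.mem_filter, decide_eq_true_eq, hW, hmemu]
    tauto
  show _ = (u.filter _).length
  rw [hperm.length_eq]
  have e5 : List.range 5 = [0, 1, 2, 3, 4] := rfl
  rw [e5]
  simp only [List.foldl_cons, List.foldl_nil]
  rw [bit_eq_if mask vals hmask (w+0), bit_eq_if mask vals hmask (w+1), bit_eq_if mask vals hmask (w+2),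
      bit_eq_if mask vals hmask (w+3), bit_eq_if mask vals hmask (w+4)]
  simp only [List.filter_cons, List.filter_nil, decide_eq_true_eq]
  push_cast
  simp only [add_zero]
  split_ifs <;> simp

theorem A_any_iff (u : List Int) :
    (((PySem.List.pyRange 0 ((u.length : Nat) : Int) 1).any (fun i =>
        decide (3 ≤ (u.filter (fun v =>
          decide (PySem.List.pyGetD u i 0 ≤ v ∧ v ≤ PySem.List.pyGetD u i 0 + 4))).length))) = true)
    ↔ ∃ a ∈ u, 3 ≤ wcnt u a := by
  simp only [List.any_eq_true, PySem.List.mem_pyRange_one, decide_eq_true_eq]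
  constructor
  · rintro ⟨i, ⟨h0, hlt⟩, hp⟩
    obtain ⟨j, rfl⟩ : ∃ j : Nat, (j : Int) = i := ⟨i.toNat, Int.toNat_of_nonneg h0⟩
    have hj : j < u.length := by exact_mod_cast hlt
    rw [PySem.List.pyGetD_natCast, List.getD_eq_getElem _ _ hj] at hp
    exact ⟨u[j], List.getElem_mem hj, hp⟩
  · rintro ⟨a, ha, h3⟩
    obtain ⟨j, hj, rfl⟩ := List.mem_iff_getElem.mp ha
    refine ⟨(j : Int), ⟨Int.natCast_nonneg j, by exact_mod_cast hj⟩, ?_⟩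
    rw [PySem.List.pyGetD_natCast, List.getD_eq_getElem _ _ hj]
    exact h3

theorem exists_window_shift (u : List Int) (hpair : u.Pairwise (· ≤ ·))
    (hb : ∀ r ∈ u, 0 ≤ r ∧ r ≤ 14) :
    (∃ a ∈ u, 3 ≤ wcnt u a) ↔ (∃ w : Nat, w < 11 ∧ 3 ≤ wcnt u ((w : Nat) : Int)) := by
  have key : ∀ lo : Int, 3 ≤ wcnt u lo →
      ∃ m ∈ u, lo ≤ m ∧ 3 ≤ wcnt u m := by
    intro lo h3
    cases hF : u.filter (fun v => decide (lo ≤ v ∧ v ≤ lo + 4)) with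
    | nil => rw [wcnt, hF] at h3; simp at h3
    | cons m rest =>
      have hmF : m ∈ u.filter (fun v => decide (lo ≤ v ∧ v ≤ lo + 4)) := by rw [hF]; exact List.mem_cons_self
      have hmu : m ∈ u := (List.mem_filter.mp hmF).1
      have hmw : lo ≤ m ∧ m ≤ lo + 4 := by
        have := (List.mem_filter.mp hmF).2
        simpa using this
      have hFpair : (u.filter (fun v => decide (lo ≤ v ∧ v ≤ lo + 4))).Pairwise (· ≤ ·) :=
        List.Pairwise.sublist List.filter_sublist hpair
      have hmin : ∀ x ∈ u.filter (fun v => decide (lo ≤ v ∧ v ≤ lo + 4)), m ≤ x := by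
        intro x hx
        rw [hF] at hx
        rcases List.mem_cons.mp hx with rfl | hx'
        · exact le_refl x
        · rw [hF] at hFpair
          exact List.rel_of_pairwise_cons hFpair hx'
      refine ⟨m, hmu, hmw.1, ?_⟩
      calc (3 : Nat) ≤ wcnt u lo := h3
        _ ≤ wcnt u m := by
          rw [wcnt, wcnt, ← List.countP_eq_length_filter, ← List.countP_eq_length_filter]
          apply List.countP_mono_left
          intro x hxu hpx
          have hpx' : lo ≤ x ∧ x ≤ lo + 4 := by simpa using hpx
          have hmx : m ≤ x := hmin x (List.mem_filter.mpr ⟨hxu, by simpa using hpx'⟩)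
          simp only [decide_eq_true_eq]
          omega
  constructor
  · rintro ⟨a, ha, h3⟩
    obtain ⟨m, hmu, _, hm3⟩ := key a h3
    obtain ⟨hm0, hm14⟩ := hb m hmu
    by_cases hm10 : m ≤ 10
    · refine ⟨m.toNat, by omega, ?_⟩
      rw [show ((m.toNat : Nat) : Int) = m by omega]
      exact hm3
    · refine ⟨10, by omega, ?_⟩
      calc (3 : Nat) ≤ wcnt u m := hm3
        _ ≤ wcnt u ((10 : Nat) : Int) := by
          rw [wcnt, wcnt, ← List.countP_eq_length_filter, ← List.countP_eq_length_filter]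
          apply List.countP_mono_left
          intro x hxu hpx
          have hpx' : m ≤ x ∧ x ≤ m + 4 := by simpa using hpx
          have := (hb x hxu).2
          simp only [decide_eq_true_eq]
          push_cast
          omega
  · rintro ⟨w, _, h3⟩
    obtain ⟨m, hmu, _, hm3⟩ := key ((w : Nat) : Int) h3
    exact ⟨m, hmu, hm3⟩

-- values of Counter(xs) as counts over set(xs)
theorem counter_values_eq {α : Type} [BEq α] [LawfulBEq α] (xs : List α) :
    (PySem.Dict.counter xs).values = (PySem.Set.ofList xs).map (fun k => (xs.count k : Int)) := by
  show (PySem.Dict.counter xs).items.map Prod.snd = _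
  rw [PySem.Dict.items_counter, List.map_map]
  rfl

-- max(Counter(xs).values()) >= 2 iff xs has a duplicate
theorem counter_max_ge_two_iff {α : Type} [BEq α] [LawfulBEq α] (xs : List α) (h : xs ≠ []) :
    (2 ≤ (PySem.List.max? (PySem.Dict.counter xs).values (fun v => v)).getD 0) ↔ ¬ xs.Nodup := by
  rw [counter_values_eq]
  have hone : PySem.Set.ofList xs ≠ [] := by
    obtain ⟨x, hx⟩ := List.exists_mem_of_ne_nil xs h
    intro h0
    have := (PySem.Set.mem_ofList xs x).mpr hx
    rw [h0] at this
    exact absurd this (List.not_mem_nil)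
  have hLne : (PySem.Set.ofList xs).map (fun k => ((List.count k xs : Nat) : Int)) ≠ [] := by
    simpa using hone
  obtain ⟨m, hm⟩ : ∃ m, PySem.List.max? ((PySem.Set.ofList xs).map (fun k => ((List.count k xs : Nat) : Int))) (fun v => v) = some m := by
    cases hmax : PySem.List.max? ((PySem.Set.ofList xs).map (fun k => ((List.count k xs : Nat) : Int))) (fun v => v) with
    | none => exact absurd ((PySem.List.max?_eq_none_iff _ _).mp hmax) hLne
    | some m => exact ⟨m, rfl⟩
  rw [hm]
  simp only [Option.getD_some]
  constructor
  · intro h2 hnd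
    have hmem := PySem.List.max?_mem hm
    obtain ⟨k, _, hkm⟩ := List.mem_map.mp hmem
    have hcle := List.nodup_iff_count_le_one.mp hnd k
    rw [← hkm] at h2
    omega
  · intro hnd
    obtain ⟨a, ha⟩ : ∃ a, 2 ≤ List.count a xs := by
      by_contra hall
      simp only [not_exists, not_le] at hall
      exact hnd (List.nodup_iff_count_le_one.mpr (fun a => by have := hall a; omega))
    have hamem : a ∈ xs := List.count_pos_iff.mp (by omega)
    have haL : ((List.count a xs : Nat) : Int) ∈ (PySem.Set.ofList xs).map (fun k => ((List.count k xs : Nat) : Int)) :=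
      List.mem_map.mpr ⟨a, (PySem.Set.mem_ofList xs a).mpr hamem, rfl⟩
    have := PySem.List.max?_isMax hm _ haL
    simp only at this
    omega

-- A's suit-Counter maximum equals B's running flush-max
theorem flush_eq (suits : List String) (hne : suits ≠ []) :
    (PySem.List.max? (PySem.Dict.counter suits).values (fun v => v)).getD 0
      = (suits.foldl suitStep (PySem.Dict.empty, 0)).2 := by
  obtain ⟨h1, h2, h3⟩ := suitFold_props suits PySem.Dict.empty 0 []
    (fun s => by simp [PySem.Dict.getD_empty])
  simp only [List.nil_append] at h2 h3
  rw [counter_values_eq]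
  have hone : PySem.Set.ofList suits ≠ [] := by
    obtain ⟨x, hx⟩ := List.exists_mem_of_ne_nil suits hne
    intro h0
    have := (PySem.Set.mem_ofList suits x).mpr hx
    rw [h0] at this
    exact absurd this (List.not_mem_nil)
  have hLne : (PySem.Set.ofList suits).map (fun k => ((List.count k suits : Nat) : Int)) ≠ [] := by
    simpa using hone
  obtain ⟨m, hm⟩ : ∃ m, PySem.List.max? ((PySem.Set.ofList suits).map (fun k => ((List.count k suits : Nat) : Int))) (fun v => v) = some m := by
    cases hmax : PySem.List.max? ((PySem.Set.ofList suits).map (fun k => ((List.count k suits : Nat) : Int))) (fun v => v) with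
    | none => exact absurd ((PySem.List.max?_eq_none_iff _ _).mp hmax) hLne
    | some m => exact ⟨m, rfl⟩
  rw [hm]
  simp only [Option.getD_some]
  obtain ⟨s₀, hs₀S, hs₀m⟩ := List.mem_map.mp (PySem.List.max?_mem hm)
  have hs₀ : s₀ ∈ suits := (PySem.Set.mem_ofList suits s₀).mp hs₀S
  apply le_antisymm
  · rw [← hs₀m]
    exact h2 s₀ hs₀
  · rcases h3 with h | ⟨s, hs, hle⟩
    · rw [h, ← hs₀m]
      exact_mod_cast Int.natCast_nonneg _
    · have hmem : ((List.count s suits : Nat) : Int) ∈ (PySem.Set.ofList suits).map (fun k => ((List.count k suits : Nat) : Int)) :=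
        List.mem_map.mpr ⟨s, (PySem.Set.mem_ofList suits s).mpr hs, rfl⟩
      have := PySem.List.max?_isMax hm _ hmem
      simp only at this
      omega

-- A's max(vals) equals B's running high card
theorem high_eq (vals : List Int) (hne : vals ≠ []) (hnn : ∀ r ∈ vals, 0 ≤ r) :
    (PySem.List.max? vals (fun v => v)).getD 0 = vals.foldl highStep 0 := by
  obtain ⟨v, t, rfl⟩ := List.exists_cons_of_ne_nil hne
  rw [PySem.List.max?_id_cons]
  simp only [Option.getD_some, List.foldl_cons]
  have h0 : highStep 0 v = v := by
    have := hnn v List.mem_cons_self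
    unfold highStep
    split <;> omega
  have hstep : highStep = max := by
    funext a b
    simp only [highStep, max_def]
    split <;> split <;> omega
  rw [h0, hstep]

-- A's windowed per-start scan over sorted(set(vals)) and B's fixed 5-wide bitmask windows agree
theorem connected_eq (vals : List Int) (mask : Nat)
    (hmask : ∀ n : Nat, mask.testBit n ↔ ((n : Int) ∈ vals))
    (hb : ∀ r ∈ vals, 0 ≤ r ∧ r ≤ 14) :
    ((PySem.List.pyRange 0 (((PySem.List.sorted (PySem.Set.ofList vals) (fun v => v) false).length : Nat) : Int) 1).any (fun i =>
        decide (3 ≤ ((PySem.List.sorted (PySem.Set.ofList vals) (fun v => v) false).filter (fun v =>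
          decide (PySem.List.pyGetD (PySem.List.sorted (PySem.Set.ofList vals) (fun v => v) false) i 0 ≤ v ∧
            v ≤ PySem.List.pyGetD (PySem.List.sorted (PySem.Set.ofList vals) (fun v => v) false) i 0 + 4))).length)))
    = ((List.range 11).any (fun w =>
        decide (3 ≤ (List.range 5).foldl (fun acc j => acc + ((mask >>> (w + j)) &&& 1)) 0))) := by
  set u := PySem.List.sorted (PySem.Set.ofList vals) (fun v => v) false with hu
  have hund : u.Nodup :=
    ((PySem.List.sorted_perm (PySem.Set.ofList vals) (fun v => v) false).nodup_iff).mpr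
      (PySem.Set.nodup_ofList vals)
  have hmemu : ∀ x, x ∈ u ↔ x ∈ vals := by
    intro x
    rw [hu, PySem.List.mem_sorted, PySem.Set.mem_ofList]
  have hpair : u.Pairwise (· ≤ ·) := by
    have := PySem.List.sorted_pairwise (PySem.Set.ofList vals) (fun v => v)
    simpa [hu] using this
  have hbu : ∀ r ∈ u, 0 ≤ r ∧ r ≤ 14 := fun r hr => hb r ((hmemu r).mp hr)
  rw [Bool.eq_iff_iff, A_any_iff]
  simp only [List.any_eq_true, List.mem_range, decide_eq_true_eq]
  constructor
  · intro h
    obtain ⟨w, hw, h3⟩ := (exists_window_shift u hpair hbu).mp h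
    exact ⟨w, hw, by rw [wcnt_eq_bits u vals mask hund hmemu hmask w]; exact h3⟩
  · rintro ⟨w, hw, h3⟩
    refine (exists_window_shift u hpair hbu).mpr ⟨w, hw, ?_⟩
    rw [← wcnt_eq_bits u vals mask hund hmemu hmask w]
    exact h3

-- ===== VERDICT (by name: the statement is the Claim_ definition above) =====
set_option maxHeartbeats 3200000 in
theorem board_bucket_py_spec : Claim_equal_board_bucket_py := by
  intro community _
  show board_bucket_py community = board_bucket_py_alt community
  by_cases hc : community = []
  · subst hc; rfl
  · simp only [board_bucket_py, board_bucket_py_alt, cardVal, if_neg hc]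
    rw [bFold_eq]
    have hvne : (community.map (fun c => rankMap.getD c.1 0)) ≠ [] := by simpa using hc
    have hsne : (community.map (fun c => c.2)) ≠ [] := by simpa using hc
    have hbd : ∀ r ∈ (community.map (fun c => rankMap.getD c.1 0)), 0 ≤ r ∧ r ≤ 14 := by
      intro r hr
      obtain ⟨c, _, rfl⟩ := List.mem_map.mp hr
      exact rank_bounds _
    have hnn : ∀ r ∈ (community.map (fun c => rankMap.getD c.1 0)), 0 ≤ r := fun r hr => (hbd r hr).1
    have hBpair : (((community.map (fun c => rankMap.getD c.1 0)).foldl rankStep (0, false)).2 = true) ↔ ¬ (community.map (fun c => rankMap.getD c.1 0)).Nodup := by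
      rw [rankFold_paired (community.map (fun c => rankMap.getD c.1 0)) 0 false hnn]
      simp [Nat.zero_testBit]
    have hmask : ∀ n : Nat, (((community.map (fun c => rankMap.getD c.1 0)).foldl rankStep (0, false)).1).testBit n ↔ ((n : Int) ∈ (community.map (fun c => rankMap.getD c.1 0))) := by
      intro n
      rw [rankFold_mask (community.map (fun c => rankMap.getD c.1 0)) 0 false n]
      simp only [Nat.zero_testBit, Bool.false_eq_true, false_or]
      constructor
      · rintro ⟨r, hr, hrn⟩
        have h0 := hnn r hr
        have heq : r = (n : Int) := by omega
        rw [← heq]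
        exact hr
      · intro hn
        exact ⟨(n : Int), hn, by simp⟩
    by_cases hnd : (community.map (fun c => rankMap.getD c.1 0)).Nodup
    · rw [if_neg (fun hcon => (counter_max_ge_two_iff (community.map (fun c => rankMap.getD c.1 0)) hvne).mp hcon hnd),
          if_neg (fun hcon => (hBpair.mp hcon) hnd),
          flush_eq (community.map (fun c => c.2)) hsne]
      simp only [high_eq (community.map (fun c => rankMap.getD c.1 0)) hvne hnn]
      have hcc := connected_eq (community.map (fun c => rankMap.getD c.1 0))
        (((community.map (fun c => rankMap.getD c.1 0)).foldl rankStep (0, false)).1) hmask hbd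
      clear hmask hbd hnn hBpair hvne hsne hnd
      exact (by rw [hcc] :
        (if 3 ≤ (List.foldl suitStep (PySem.Dict.empty, 0) (community.map (fun c => c.2))).2 then (1:Int) else if (List.foldl suitStep (PySem.Dict.empty, 0) (community.map (fun c => c.2))).2 = 2 then 2 else if ((PySem.List.pyRange 0 (((PySem.List.sorted (PySem.Set.ofList (community.map (fun c => rankMap.getD c.1 0))) (fun v => v) false).length : Nat) : Int) 1).any (fun i => decide (3 ≤ ((PySem.List.sorted (PySem.Set.ofList (community.map (fun c => rankMap.getD c.1 0))) (fun v => v) false).filter (fun v => decide (PySem.List.pyGetD (PySem.List.sorted (PySem.Set.ofList (community.map (fun c => rankMap.getD c.1 0))) (fun v => v) false) i 0 ≤ v ∧ v ≤ PySem.List.pyGetD (PySem.List.sorted (PySem.Set.ofList (community.map (fun c => rankMap.getD c.1 0))) (fun v => v) false) i 0 + 4))).length))) = true then 3 else (if 12 ≤ List.foldl highStep 0 (community.map (fun c => rankMap.getD c.1 0)) then (4:Int) else if 9 ≤ List.foldl highStep 0 (community.map (fun c => rankMap.getD c.1 0)) then 5 else 6))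
          = (if 3 ≤ (List.foldl suitStep (PySem.Dict.empty, 0) (community.map (fun c => c.2))).2 then (1:Int) else if (List.foldl suitStep (PySem.Dict.empty, 0) (community.map (fun c => c.2))).2 = 2 then 2 else if ((List.range 11).any (fun w => decide (3 ≤ (List.range 5).foldl (fun acc j => acc + ((((community.map (fun c => rankMap.getD c.1 0)).foldl rankStep (0, false)).1 >>> (w + j)) &&& 1)) 0))) = true then 3 else (if 12 ≤ List.foldl highStep 0 (community.map (fun c => rankMap.getD c.1 0)) then (4:Int) else if 9 ≤ List.foldl highStep 0 (community.map (fun c => rankMap.getD c.1 0)) then 5 else 6)))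
    · rw [if_pos ((counter_max_ge_two_iff (community.map (fun c => rankMap.getD c.1 0)) hvne).mpr hnd),
          if_pos (hBpair.mpr hnd)]
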